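-- pv_equiv track=rewrite | github.com/nanaagyei/dsa | 3sum_less.py | threeSumLessThanTarget
-- ===== SOURCE A (Python) =====
-- def threeSumLessThanTarget(arr, target):
--     arr.sort()
--     count = 0
--     for i in range(len(arr) - 2):
--         left, right = i + 1, len(arr) - 1
--
--         while left < right:
--             threeSum = arr[i] + arr[left] + arr[right]
--
--
--             if threeSum < target:
--                 count += right - left
--                 left += 1
--             else:
--                 right -= 1
--     return count
-- ===== SOURCE B (Python) =====
-- def _lower_bound(arr, need, lo, hi):
--     # first index in [lo, hi) whose value is >= need (arr sorted on that range)
--     while lo < hi: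
--         mid = (lo + hi) // 2
--         if arr[mid] < need:
--             lo = mid + 1
--         else:
--             hi = mid
--     return lo
--
--
-- def threeSumLessThanTarget(arr, target):
--     arr.sort()
--     n = len(arr)
--     count = 0
--     for i in range(n - 2):
--         for j in range(i + 1, n - 1):
--             need = target - arr[i] - arr[j]
--             count += _lower_bound(arr, need, j + 1, n) - (j + 1)
--     return count
-- ===== Notes on version B (the rewrite author's own statement) =====
-- stated objective: alternative
-- what changed: Replaces the per-i two-pointer sweep with, for each sorted pair (i,j), a hand-written lower-bound binary search over the suffix arr[j+1:] counting elements below target-arr[i]-arr[j].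
import Mathlib
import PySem

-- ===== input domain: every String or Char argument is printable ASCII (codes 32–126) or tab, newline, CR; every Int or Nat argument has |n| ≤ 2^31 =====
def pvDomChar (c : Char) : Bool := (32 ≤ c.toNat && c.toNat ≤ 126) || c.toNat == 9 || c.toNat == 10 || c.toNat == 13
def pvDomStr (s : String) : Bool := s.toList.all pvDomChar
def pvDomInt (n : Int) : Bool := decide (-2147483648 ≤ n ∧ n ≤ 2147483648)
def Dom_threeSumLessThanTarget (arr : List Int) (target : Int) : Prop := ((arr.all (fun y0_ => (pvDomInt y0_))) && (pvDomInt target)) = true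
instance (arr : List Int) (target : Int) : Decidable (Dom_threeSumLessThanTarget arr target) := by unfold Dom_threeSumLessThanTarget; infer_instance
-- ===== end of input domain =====

-- B replaces A's per-i two-pointer sweep by a per-pair lower-bound binary search over the
-- sorted suffix (alternative algorithm, not claimed faster); both A and B sort arr in place
-- in Python — the theorems here are about the return value.

-- ===== PORT A =====
-- the 'while left < right' loop of A (arr, target, i fixed; state left/right/count)
def pvLoopA (a : List Int) (t : Int) (i : Int) (left right count : Int) : Int :=
  if left < right then
    let s := PySem.List.pyGetD a i 0 + PySem.List.pyGetD a left 0 + PySem.List.pyGetD a right 0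
    if s < t then pvLoopA a t i (left + 1) right (count + (right - left))
    else pvLoopA a t i left (right - 1) count
  else count
termination_by (right - left).toNat
decreasing_by all_goals omega

def threeSumLessThanTarget (arr : List Int) (target : Int) : Int :=
  let a := PySem.List.sorted arr id
  (PySem.List.pyRange 0 ((a.length : Int) - 2) 1).foldl
    (fun count i => pvLoopA a target i (i + 1) ((a.length : Int) - 1) count) 0

-- ===== PORT B =====
-- the 'while lo < hi' loop of B's _lower_bound helper
def pvBS (a : List Int) (need : Int) (lo hi : Int) : Int :=
  if lo < hi then
    let mid := PySem.Int.floordiv (lo + hi) 2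
    if PySem.List.pyGetD a mid 0 < need then pvBS a need (mid + 1) hi
    else pvBS a need lo mid
  else lo
termination_by (hi - lo).toNat
decreasing_by
  · have h := PySem.Int.floordiv_two_mid_bounds (le_of_lt (by omega : lo < hi))
    omega
  · have h2 : PySem.Int.floordiv (lo + hi) 2 < hi :=
      (PySem.Int.floordiv_lt_iff_lt_mul (by norm_num)).mpr (by omega)
    omega

def threeSumLessThanTarget_alt (arr : List Int) (target : Int) : Int :=
  let a := PySem.List.sorted arr id
  let n : Int := a.length
  (PySem.List.pyRange 0 (n - 2) 1).foldl (fun count i =>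
    (PySem.List.pyRange (i + 1) (n - 1) 1).foldl (fun count j =>
      let need := target - PySem.List.pyGetD a i 0 - PySem.List.pyGetD a j 0
      count + (pvBS a need (j + 1) n - (j + 1))) count) 0

-- ===== PRECONDITION & SPEC =====
def Spec_threeSumLessThanTarget (arr : List Int) (target : Int) (out : Int) : Prop := out = threeSumLessThanTarget_alt arr target
instance (arr : List Int) (target : Int) (out : Int) : Decidable (Spec_threeSumLessThanTarget arr target out) := by unfold Spec_threeSumLessThanTarget; infer_instance

-- ===== CLAIM (what is proved, stated in full; the proofs are below) =====
def Claim_equal_threeSumLessThanTarget : Prop := ∀ (arr : List Int) (target : Int), Dom_threeSumLessThanTarget arr target → Spec_threeSumLessThanTarget arr target (threeSumLessThanTarget arr target)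

-- ===== LEMMAS AND PROOFS =====

-- proof-side abbreviations: element access, per-p count, per-i pair count
def pvG (a : List Int) (k : Nat) : Int := a.getD k 0

def pvC (a : List Int) (t : Int) (i p r : Nat) : Nat :=
  ∑ q ∈ Finset.Ioc p r, if pvG a i + pvG a p + pvG a q < t then 1 else 0

def pvS (a : List Int) (t : Int) (i l r : Nat) : Nat :=
  ∑ p ∈ Finset.Ico l r, pvC a t i p r

lemma pvG_mono (a : List Int) (ha : a.Pairwise (· ≤ ·)) {p q : Nat}
    (hpq : p ≤ q) (hq : q < a.length) : pvG a p ≤ pvG a q := by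
  rcases eq_or_lt_of_le hpq with h | h
  · subst h; exact le_refl _
  · have hp : p < a.length := lt_trans h hq
    have := (List.pairwise_iff_getElem.mp ha) p q hp hq h
    simpa [pvG, List.getD_eq_getElem?_getD, List.getElem?_eq_getElem, hp, hq] using this

lemma sum_map_range (f : Nat → Int) (n : Nat) :
    ((List.range n).map f).sum = ∑ i ∈ Finset.range n, f i := by
  induction n with
  | zero => simp
  | succ m ih => rw [List.range_succ, Finset.sum_range_succ, List.map_append, List.sum_append, ih]; simp

-- two-pointer loop of A counts, for fixed i, the pairs (p,q), l <= p < q <= r, with a[i]+a[p]+a[q] < t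
lemma pvLoopA_spec (a : List Int) (ha : a.Pairwise (· ≤ ·)) (t : Int) (i : Nat) :
    ∀ (m l r : Nat) (c : Int), r - l ≤ m → r < a.length →
      pvLoopA a t (i : Int) (l : Int) (r : Int) c = c + (pvS a t i l r : Int) := by
  intro m
  induction m with
  | zero =>
    intro l r c hm hr
    rw [pvLoopA, if_neg (by omega : ¬ ((l : Int) < (r : Int)))]
    have he : Finset.Ico l r = ∅ := Finset.Ico_eq_empty (by omega)
    simp [pvS, he]
  | succ m ih =>
    intro l r c hm hr
    by_cases hlr : l < r
    · rw [pvLoopA, if_pos (by omega : ((l : Int) < (r : Int)))]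
      simp only [PySem.List.pyGetD_natCast]
      by_cases hst : a.getD i 0 + a.getD l 0 + a.getD r 0 < t
      · rw [if_pos hst]
        rw [show (l : Int) + 1 = ((l + 1 : Nat) : Int) by push_cast; ring]
        rw [ih (l + 1) r _ (by omega) hr]
        have hC : pvC a t i l r = r - l := by
          rw [pvC, Finset.sum_congr rfl (fun q hq => ?_), Finset.sum_const, smul_eq_mul,
            mul_one, Nat.card_Ioc]
          rw [Finset.mem_Ioc] at hq
          rw [if_pos]
          have hmq : pvG a q ≤ pvG a r := pvG_mono a ha hq.2 hr
          have : pvG a i + pvG a l + pvG a r < t := hst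
          unfold pvG at *
          omega
        have hS : pvS a t i l r = (r - l) + pvS a t i (l + 1) r := by
          rw [pvS, Finset.sum_eq_sum_Ico_succ_bot hlr, hC]; rfl
        rw [hS]
        omega
      · rw [if_neg hst]
        rw [show (r : Int) - 1 = ((r - 1 : Nat) : Int) by omega]
        rw [ih l (r - 1) c (by omega) (by omega)]
        have hstep : ∀ p ∈ Finset.Ico l r, pvC a t i p r = pvC a t i p (r - 1) := by
          intro p hp
          rw [Finset.mem_Ico] at hp
          have h2 := Finset.sum_Ioc_succ_top (show p ≤ r - 1 by omega)
            (fun q => if pvG a i + pvG a p + pvG a q < t then 1 else 0)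
          rw [show r - 1 + 1 = r by omega] at h2
          have hcond : ¬ (pvG a i + pvG a p + pvG a r < t) := by
            have hlp : pvG a l ≤ pvG a p := pvG_mono a ha hp.1 (by omega)
            have hst' : ¬ (pvG a i + pvG a l + pvG a r < t) := hst
            unfold pvG at *
            omega
          rw [pvC, pvC, h2, if_neg hcond, add_zero]
        have hS : pvS a t i l r = pvS a t i l (r - 1) := by
          rw [pvS, Finset.sum_congr rfl hstep]
          have h2 := Finset.sum_Ico_succ_top (show l ≤ r - 1 by omega)
            (fun p => pvC a t i p (r - 1))
          rw [show r - 1 + 1 = r by omega] at h2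
          rw [h2, pvS]
          have h0 : pvC a t i (r - 1) (r - 1) = 0 := by rw [pvC]; simp
          rw [h0, add_zero]
        rw [hS]
    · rw [pvLoopA, if_neg (by omega : ¬ ((l : Int) < (r : Int)))]
      have he : Finset.Ico l r = ∅ := Finset.Ico_eq_empty (by omega)
      simp [pvS, he]

-- binary search returns the split point of [lo, hi) between values < need and values >= need
lemma pvBS_spec (a : List Int) (ha : a.Pairwise (· ≤ ·)) (need : Int) :
    ∀ (m lo hi : Nat), hi - lo ≤ m → lo ≤ hi → hi ≤ a.length →
      ∃ r : Nat, pvBS a need (lo : Int) (hi : Int) = (r : Int) ∧ lo ≤ r ∧ r ≤ hi ∧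
        (∀ k, lo ≤ k → k < r → pvG a k < need) ∧
        (∀ k, r ≤ k → k < hi → need ≤ pvG a k) := by
  intro m
  induction m with
  | zero =>
    intro lo hi hm h1 h2
    refine ⟨lo, ?_, le_refl _, by omega, fun k hk1 hk2 => by omega, fun k hk1 hk2 => by omega⟩
    rw [pvBS, if_neg (by omega : ¬ ((lo : Int) < (hi : Int)))]
  | succ m ih =>
    intro lo hi hm h1 h2
    by_cases hlh : lo < hi
    · have hmid : PySem.Int.floordiv ((lo : Int) + (hi : Int)) 2 = (((lo + hi) / 2 : Nat) : Int) := by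
        rw [show (lo : Int) + (hi : Int) = ((lo + hi : Nat) : Int) by push_cast; ring]
        exact_mod_cast PySem.Int.floordiv_natCast (lo + hi) 2
      have hMlo : lo ≤ (lo + hi) / 2 := by omega
      have hMhi : (lo + hi) / 2 < hi := by omega
      rw [pvBS, if_pos (by omega : ((lo : Int) < (hi : Int)))]
      simp only [hmid, PySem.List.pyGetD_natCast]
      by_cases hv : a.getD ((lo + hi) / 2) 0 < need
      · rw [if_pos hv]
        obtain ⟨r, hr, hr1, hr2, hr3, hr4⟩ := ih ((lo + hi) / 2 + 1) hi (by omega) (by omega) h2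
        rw [show (((lo + hi) / 2 : Nat) : Int) + 1 = (((lo + hi) / 2 + 1 : Nat) : Int) by push_cast; ring]
        refine ⟨r, hr, by omega, hr2, ?_, hr4⟩
        intro k hk1 hk2
        by_cases hkM : k ≤ (lo + hi) / 2
        · have := pvG_mono a ha hkM (by omega)
          unfold pvG at *
          omega
        · exact hr3 k (by omega) hk2
      · rw [if_neg hv]
        obtain ⟨r, hr, hr1, hr2, hr3, hr4⟩ := ih lo ((lo + hi) / 2) (by omega) (by omega) (by omega)
        refine ⟨r, hr, hr1, by omega, hr3, ?_⟩
        intro k hk1 hk2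
        by_cases hkM : k < (lo + hi) / 2
        · exact hr4 k hk1 hkM
        · have := pvG_mono a ha (show (lo + hi) / 2 ≤ k by omega) (by omega)
          unfold pvG at *
          omega
    · refine ⟨lo, ?_, le_refl _, by omega, fun k hk1 hk2 => by omega, fun k hk1 hk2 => by omega⟩
      rw [pvBS, if_neg (by omega : ¬ ((lo : Int) < (hi : Int)))]


-- B's inner j-loop also computes pvS
lemma pvInnerB_spec (a : List Int) (ha : a.Pairwise (· ≤ ·)) (t : Int) (i : Nat)
    (hi2 : i + 2 < a.length) (c : Int) :
    (PySem.List.pyRange ((i : Int) + 1) ((a.length : Int) - 1) 1).foldl (fun count j =>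
      count + (pvBS a (t - PySem.List.pyGetD a (i : Int) 0 - PySem.List.pyGetD a j 0) (j + 1) (a.length : Int) - (j + 1))) c
    = c + (pvS a t i (i + 1) (a.length - 1) : Int) := by
  rw [PySem.List.foldl_add]
  congr 1
  rw [PySem.List.pyRange_one, List.map_map]
  have hK : (((a.length : Int) - 1) - ((i : Int) + 1)).toNat = a.length - 1 - (i + 1) := by omega
  rw [hK, sum_map_range]
  simp only [Function.comp_def]
  have hterm : ∀ k ∈ Finset.range (a.length - 1 - (i + 1)),
      (fun j => pvBS a (t - PySem.List.pyGetD a (i : Int) 0 - PySem.List.pyGetD a j 0) (j + 1) (a.length : Int) - (j + 1)) (((i : Int) + 1) + (k : Int))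
      = (pvC a t i (i + 1 + k) (a.length - 1) : Int) := by
    intro k hk
    rw [Finset.mem_range] at hk
    set j : Nat := i + 1 + k with hj
    have hjN : j + 1 ≤ a.length := by omega
    simp only
    rw [show ((i : Int) + 1) + (k : Int) = ((j : Nat) : Int) by omega]
    simp only [PySem.List.pyGetD_natCast]
    set need : Int := t - a.getD i 0 - a.getD j 0 with hneed
    obtain ⟨r, hr, hr1, hr2, hr3, hr4⟩ :=
      pvBS_spec a ha need (a.length - (j + 1)) (j + 1) a.length (le_refl _) hjN (le_refl _)
    rw [show ((j : Nat) : Int) + 1 = ((j + 1 : Nat) : Int) by push_cast; ring, hr]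
    have hIoc : Finset.Ioc j (a.length - 1) = Finset.Ico (j + 1) a.length := by
      ext q
      simp only [Finset.mem_Ioc, Finset.mem_Ico]
      omega
    have hsplit := Finset.sum_Ico_consecutive
      (fun q => if pvG a i + pvG a j + pvG a q < t then 1 else 0) hr1 hr2
    have hones : ∑ q ∈ Finset.Ico (j + 1) r,
        (if pvG a i + pvG a j + pvG a q < t then 1 else 0) = r - (j + 1) := by
      rw [Finset.sum_congr rfl (fun q hq => ?_), Finset.sum_const, smul_eq_mul, mul_one,
        Nat.card_Ico]
      rw [Finset.mem_Ico] at hq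
      rw [if_pos]
      have := hr3 q hq.1 hq.2
      unfold pvG at *
      omega
    have hzeros : ∑ q ∈ Finset.Ico r a.length,
        (if pvG a i + pvG a j + pvG a q < t then 1 else 0) = 0 := by
      rw [Finset.sum_congr rfl (fun q hq => ?_), Finset.sum_const, smul_eq_mul, mul_zero]
      rw [Finset.mem_Ico] at hq
      rw [if_neg]
      have := hr4 q hq.1 hq.2
      unfold pvG at *
      omega
    have hcnt : pvC a t i j (a.length - 1) = r - (j + 1) := by
      rw [pvC, hIoc, ← hsplit, hones, hzeros, add_zero]
    rw [hcnt]
    omega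
  rw [Finset.sum_congr rfl hterm]
  rw [pvS, Finset.sum_Ico_eq_sum_range]
  push_cast
  rfl

-- ===== VERDICT (by name: the statement is the Claim_ definition above) =====
theorem threeSumLessThanTarget_spec : Claim_equal_threeSumLessThanTarget := by
  intro arr target _
  unfold Spec_threeSumLessThanTarget threeSumLessThanTarget threeSumLessThanTarget_alt
  set a := PySem.List.sorted arr id with hadef
  have ha : a.Pairwise (· ≤ ·) := by simpa using PySem.List.sorted_pairwise arr id
  show (PySem.List.pyRange 0 ((a.length : Int) - 2) 1).foldl
      (fun count i => pvLoopA a target i (i + 1) ((a.length : Int) - 1) count) 0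
    = (PySem.List.pyRange 0 ((a.length : Int) - 2) 1).foldl (fun count i =>
        (PySem.List.pyRange (i + 1) ((a.length : Int) - 1) 1).foldl (fun count j =>
          count + (pvBS a (target - PySem.List.pyGetD a i 0 - PySem.List.pyGetD a j 0)
            (j + 1) (a.length : Int) - (j + 1))) count) 0
  apply PySem.List.foldl_congr_mem
  intro c i hi
  rw [PySem.List.mem_pyRange_one] at hi
  obtain ⟨hi0, hiub⟩ := hi
  have hiN : i = ((i.toNat : Nat) : Int) := by omega
  have hlen : i.toNat + 2 < a.length := by omega
  rw [hiN]
  rw [show ((i.toNat : Nat) : Int) + 1 = ((i.toNat + 1 : Nat) : Int) by push_cast; ring,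
    show ((a.length : Int) - 1) = ((a.length - 1 : Nat) : Int) by omega]
  rw [pvLoopA_spec a ha target i.toNat ((a.length - 1) - (i.toNat + 1)) (i.toNat + 1)
    (a.length - 1) c (le_refl _) (by omega)]
  rw [show ((i.toNat + 1 : Nat) : Int) = ((i.toNat : Nat) : Int) + 1 by push_cast; ring,
    show ((a.length - 1 : Nat) : Int) = ((a.length : Int) - 1) by omega]
  rw [pvInnerB_spec a ha target i.toNat hlen c]
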